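-- pv_equiv track=rewrite | github.com/DMFriends/portfolio | Python/Sequence/count_sequences.py | count_column_seq
-- ===== SOURCE A (Python) =====
-- def count_column_seq(player_id, player_move_locations):
-- 	column = 0
-- 	num_sequences = 0
-- 	while column <= 7:
-- 		row = 0
-- 		length = 0
-- 		while row <= 5:
-- 			if [row, column] in player_move_locations[player_id]:
-- 				length += 1
-- 			else:
-- 				length = 0
-- 			if length >= 4:
-- 				num_sequences += 1
-- 				break
-- 			row += 1
-- 		column += 1
--
-- 	return num_sequences
-- ===== SOURCE B (Python) =====
-- def count_column_seq(player_id, player_move_locations):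
--     occ = {tuple(c) for c in player_move_locations[player_id]}
--     return sum(
--         1
--         for col in range(8)
--         if any(all((r + k, col) in occ for k in range(4)) for r in range(3))
--     )
-- ===== Notes on version B (the rewrite author's own statement) =====
-- stated objective: alternative
-- what changed: Replaces A's per-column running-length reset scan (with break) by building a set of occupied cells once and testing the three possible 4-row vertical windows per column by set membership.
import Mathlib
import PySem

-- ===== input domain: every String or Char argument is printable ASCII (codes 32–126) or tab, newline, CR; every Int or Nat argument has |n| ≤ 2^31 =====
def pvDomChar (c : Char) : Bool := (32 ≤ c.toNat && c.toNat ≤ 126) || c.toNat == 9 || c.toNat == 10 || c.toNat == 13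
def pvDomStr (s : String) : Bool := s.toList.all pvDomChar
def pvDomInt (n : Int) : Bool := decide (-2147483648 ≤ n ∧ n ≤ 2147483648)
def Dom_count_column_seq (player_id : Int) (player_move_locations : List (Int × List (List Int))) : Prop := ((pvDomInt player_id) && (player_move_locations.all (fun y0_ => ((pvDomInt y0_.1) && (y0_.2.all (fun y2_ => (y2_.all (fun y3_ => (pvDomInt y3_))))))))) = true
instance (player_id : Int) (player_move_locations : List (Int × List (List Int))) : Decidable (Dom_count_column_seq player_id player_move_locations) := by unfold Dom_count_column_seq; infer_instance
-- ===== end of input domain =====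

-- ===== PORT A =====
-- B replaces A's running-length reset scan per column by fixed 4-row window membership tests
-- over a set of occupied cells (objective: alternative decomposition; same exact result).

-- inner 'while row <= 5' loop of A: returns 1 if a vertical run of length 4 is found (break), else 0
def ccsRow (moves : List (List Int)) (column row length : Int) : Nat → Int
  | 0 => 0
  | fuel + 1 =>
    if row ≤ 5 then
      let length' := if moves.contains [row, column] then length + 1 else 0
      if length' ≥ 4 then 1 else ccsRow moves column (row + 1) length' fuel
    else 0

-- outer 'while column <= 7' loop of A
def ccsCol (moves : List (List Int)) (column num : Int) : Nat → Int
  | 0 => num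
  | fuel + 1 =>
    if column ≤ 7 then ccsCol moves (column + 1) (num + ccsRow moves column 0 0 6) fuel
    else num

def count_column_seq (player_id : Int) (player_move_locations : List (Int × List (List Int))) : Int :=
  match List.lookup player_id player_move_locations with   -- player_move_locations[player_id]; KeyError excluded by Pre_
  | none => 0
  | some moves => ccsCol moves 0 0 8

-- ===== PORT B =====
def count_column_seq_alt (player_id : Int) (player_move_locations : List (Int × List (List Int))) : Int :=
  match List.lookup player_id player_move_locations with   -- same dict indexing (KeyError excluded by Pre_)
  | none => 0
  | some moves =>
    let occ := PySem.Set.ofList moves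
    (((PySem.List.pyRange 0 8 1).filter (fun col =>
        (PySem.List.pyRange 0 3 1).any (fun r =>
          (PySem.List.pyRange 0 4 1).all (fun k => occ.contains [r + k, col])))).map
      (fun _ => (1 : Int))).sum

-- ===== PRECONDITION & SPEC =====
-- Pre_ excludes exactly the inputs where Python A raises KeyError: player_id not a key of the dict.
def Pre_count_column_seq (player_id : Int) (player_move_locations : List (Int × List (List Int))) : Prop :=
  (List.lookup player_id player_move_locations).isSome
instance (player_id : Int) (player_move_locations : List (Int × List (List Int))) : Decidable (Pre_count_column_seq player_id player_move_locations) := by unfold Pre_count_column_seq; infer_instance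

def pvWitness_count_column_seq : Int × (List (Int × List (List Int))) :=
  (1, [(1, [[0, 3], [1, 3], [2, 3], [3, 3]])])


-- ===== PRECONDITION & SPEC (cont.) =====
def Spec_count_column_seq (player_id : Int) (player_move_locations : List (Int × List (List Int))) (out : Int) : Prop := out = count_column_seq_alt player_id player_move_locations
instance (player_id : Int) (player_move_locations : List (Int × List (List Int))) (out : Int) : Decidable (Spec_count_column_seq player_id player_move_locations out) := by unfold Spec_count_column_seq; infer_instance

-- ===== CLAIM (what is proved, stated in full; the proofs are below) =====
def Claim_equal_count_column_seq : Prop := ∀ (player_id : Int) (player_move_locations : List (Int × List (List Int))), Dom_count_column_seq player_id player_move_locations → Pre_count_column_seq player_id player_move_locations → Spec_count_column_seq player_id player_move_locations (count_column_seq player_id player_move_locations)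

-- ===== LEMMAS AND PROOFS =====

-- A's inner row loop, abstracted over the per-column result (proof helper only)
def ccsColGen (f : Int → Int) (column num : Int) : Nat → Int
  | 0 => num
  | fuel + 1 =>
    if column ≤ 7 then ccsColGen f (column + 1) (num + f column) fuel
    else num

lemma ccsCol_eq_gen (moves : List (List Int)) (c n : Int) (fuel : Nat) :
    ccsCol moves c n fuel = ccsColGen (fun col => ccsRow moves col 0 0 6) c n fuel := by
  induction fuel generalizing c n with
  | zero => rfl
  | succ k ih => simp only [ccsCol, ccsColGen]; split <;> simp [ih]

-- per column: A's running-length scan over rows 0..5 finds a run of 4 iff some 4-window starting at r ∈ {0,1,2} is fully occupied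
lemma ccs_inner_eq (moves : List (List Int)) (col : Int) :
    ccsRow moves col 0 0 6 =
      (if (PySem.List.pyRange 0 3 1).any (fun r =>
            (PySem.List.pyRange 0 4 1).all (fun k => (PySem.Set.ofList moves).contains [r + k, col]))
        then (1 : Int) else 0) := by
  have e3 : PySem.List.pyRange 0 3 1 = [0,1,2] := by decide
  have e4 : PySem.List.pyRange 0 4 1 = [0,1,2,3] := by decide
  have hc : ∀ x : List Int, (PySem.Set.ofList moves).contains x = moves.contains x := by
    intro x
    simp [List.contains_eq_mem, PySem.Set.mem_ofList]
  rw [e3, e4]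
  simp only [List.any_cons, List.any_nil, List.all_cons, List.all_nil, hc]
  norm_num
  cases h0 : moves.contains [0, col] <;>
  cases h1 : moves.contains [1, col] <;>
  cases h2 : moves.contains [2, col] <;>
  cases h3 : moves.contains [3, col] <;>
  cases h4 : moves.contains [4, col] <;>
  cases h5 : moves.contains [5, col] <;>
  simp_all [ccsRow]

lemma ccsColGen_eq_sum (P : Int → Bool) :
    ccsColGen (fun c => if P c then (1:Int) else 0) 0 0 8 =
    (((PySem.List.pyRange 0 8 1).filter P).map (fun _ => (1:Int))).sum := by
  have e8 : PySem.List.pyRange 0 8 1 = [0,1,2,3,4,5,6,7] := by decide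
  rw [e8]
  simp only [ccsColGen]
  norm_num [List.filter]
  cases h0 : P 0 <;> cases h1 : P 1 <;> cases h2 : P 2 <;> cases h3 : P 3 <;>
  cases h4 : P 4 <;> cases h5 : P 5 <;> cases h6 : P 6 <;> cases h7 : P 7 <;>
  simp_all

-- ===== VERDICT (by name: the statement is the Claim_ definition above) =====
theorem count_column_seq_spec : Claim_equal_count_column_seq := by
  intro pid pml _ _
  unfold Spec_count_column_seq count_column_seq count_column_seq_alt
  cases h : List.lookup pid pml with
  | none => rfl
  | some moves =>
    simp only []
    rw [ccsCol_eq_gen]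
    have hf : (fun col => ccsRow moves col 0 0 6) =
        (fun c => if (PySem.List.pyRange 0 3 1).any (fun r =>
            (PySem.List.pyRange 0 4 1).all (fun k => (PySem.Set.ofList moves).contains [r + k, c]))
          then (1 : Int) else 0) := funext (ccs_inner_eq moves)
    rw [hf, ccsColGen_eq_sum]
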